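-- pv_equiv track=rewrite | github.com/Tomas-Tamantini/aoc-py | src/solutions/y2025/d03/logic/optimize_joltage.py | optimize_joltage
-- ===== SOURCE A (Python) =====
-- def optimize_joltage(batteries: tuple[int, ...], num_digits: int) -> int:
--     if num_digits == 1:
--         return max(batteries)
--     max_digit = max(batteries[: -(num_digits - 1)])
--     max_digit_idx = batteries.index(max_digit)
--     remaining = optimize_joltage(
--         batteries[max_digit_idx + 1 :], num_digits=num_digits - 1
--     )
--     return 10 ** (num_digits - 1) * max_digit + remaining
-- ===== SOURCE B (Python) =====
-- def optimize_joltage(batteries, num_digits):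
--     n = len(batteries)
--     if not 1 <= num_digits <= n:
--         raise ValueError("cannot pick num_digits batteries in order")
--     stack = []
--     for i, x in enumerate(batteries):
--         while stack and stack[-1] < x and len(stack) + (n - i) > num_digits:
--             stack.pop()
--         stack.append(x)
--     value = 0
--     for x in stack[:num_digits]:
--         value = value * 10 + x
--     return value
-- ===== Notes on version B (the rewrite author's own statement) =====
-- stated objective: faster
-- what changed: Replaced A's recursive repeated window-max-plus-index scan (one scan per selected digit) by a single left-to-right monotonic-stack pass that selects the lexicographically largest length-d subsequence, then folds it into the number with Horner's rule.
import Mathlib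
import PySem

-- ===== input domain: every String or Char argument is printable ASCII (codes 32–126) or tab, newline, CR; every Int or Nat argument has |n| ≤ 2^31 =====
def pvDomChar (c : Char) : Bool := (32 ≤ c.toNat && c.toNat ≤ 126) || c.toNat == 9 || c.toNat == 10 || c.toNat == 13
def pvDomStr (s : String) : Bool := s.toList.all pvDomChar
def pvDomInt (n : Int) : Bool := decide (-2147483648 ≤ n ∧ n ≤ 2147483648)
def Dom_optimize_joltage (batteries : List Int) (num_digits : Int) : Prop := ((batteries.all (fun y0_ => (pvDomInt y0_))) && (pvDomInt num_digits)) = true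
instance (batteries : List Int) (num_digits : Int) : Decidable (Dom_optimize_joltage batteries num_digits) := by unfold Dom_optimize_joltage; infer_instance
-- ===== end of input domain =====

-- B replaces A's per-digit window-max rescans by one monotonic-stack pass plus a Horner fold (objective: faster, O(n) vs O(n*d)).

-- ===== PORT A =====
-- literal port of A; where Python raises ValueError (max of an empty sequence) the port
-- returns 0 — those inputs are excluded by Pre_optimize_joltage
def optimize_joltage (batteries : List Int) (num_digits : Int) : Int :=
  if num_digits = 1 then (PySem.List.max? batteries (fun y => y)).getD 0
  else
    match PySem.List.max? (PySem.List.slice batteries none (some (-(num_digits - 1)))) (fun y => y) with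
    | none => 0
    | some m =>
      match h : PySem.List.index? batteries m with
      | none => 0
      | some idx =>
        10 ^ (num_digits - 1).toNat * m
          + optimize_joltage (PySem.List.slice batteries (some ((idx : Int) + 1)) none) (num_digits - 1)
termination_by batteries.length
decreasing_by
  obtain ⟨hk, -, -⟩ := PySem.List.getElem_of_index?_eq_some h
  have : ((idx : Int) + 1) = ((idx + 1 : Nat) : Int) := by push_cast; ring
  rw [this, PySem.List.slice_from_natCast, List.length_drop]
  omega

-- ===== PORT B =====
-- the while-pop loop of Source B; the Python stack's top (its last element) is the HEAD here
def popB (n k i x : Int) : List Int → List Int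
  | [] => []
  | t :: rest =>
      if t < x ∧ (((t :: rest).length : Int) + (n - i) > k) then popB n k i x rest
      else t :: rest

-- where Source B raises ValueError (infeasible num_digits) the port returns 0; excluded by Pre_
def optimize_joltage_alt (batteries : List Int) (num_digits : Int) : Int :=
  let n : Int := batteries.length
  if ¬ (1 ≤ num_digits ∧ num_digits ≤ n) then 0 else
  let stack := (PySem.List.enumerate batteries 0).foldl
      (fun st (p : Int × Int) => p.2 :: popB n num_digits p.1 p.2 st) ([] : List Int)
  (PySem.List.slice stack.reverse none (some num_digits)).foldl (fun v x => v * 10 + x) 0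

-- ===== PRECONDITION & SPEC =====
-- Pre_ excludes exactly the inputs where Python A raises: num_digits < 1 (A recurses until
-- max() of an empty sequence raises ValueError) or num_digits > len(batteries) (the window
-- slice is empty and max() raises ValueError).
def Pre_optimize_joltage (batteries : List Int) (num_digits : Int) : Prop :=
  1 ≤ num_digits ∧ num_digits ≤ batteries.length
instance (batteries : List Int) (num_digits : Int) : Decidable (Pre_optimize_joltage batteries num_digits) := by unfold Pre_optimize_joltage; infer_instance
def pvWitness_optimize_joltage : List Int × Int := ([3, 1, 2], 2)

def Spec_optimize_joltage (batteries : List Int) (num_digits : Int) (out : Int) : Prop := out = optimize_joltage_alt batteries num_digits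
instance (batteries : List Int) (num_digits : Int) (out : Int) : Decidable (Spec_optimize_joltage batteries num_digits out) := by unfold Spec_optimize_joltage; infer_instance

-- ===== CLAIM (what is proved, stated in full; the proofs are below) =====
def Claim_equal_optimize_joltage : Prop := ∀ (batteries : List Int) (num_digits : Int), Dom_optimize_joltage batteries num_digits → Pre_optimize_joltage batteries num_digits → Spec_optimize_joltage batteries num_digits (optimize_joltage batteries num_digits)

-- ===== LEMMAS AND PROOFS =====

-- the stack-building loop of B as a structural recursion (index threaded explicitly)
def runA (n k : Int) : List Int → Int → List Int → List Int
  | [], _, st => st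
  | x :: xs, i, st => runA n k xs (i + 1) (x :: popB n k i x st)

theorem foldl_enum_eq_runA (n k : Int) (bs : List Int) : ∀ (i : Int) (st : List Int),
    (PySem.List.enumerate bs i).foldl (fun st (p : Int × Int) => p.2 :: popB n k p.1 p.2 st) st
      = runA n k bs i st := by
  induction bs with
  | nil => intro i st; simp [PySem.List.enumerate_nil, runA]
  | cons x xs ih => intro i st; rw [PySem.List.enumerate_cons]; simp only [List.foldl_cons]; exact ih (i+1) _

theorem mem_popB {n k i x : Int} {y : Int} : ∀ {st : List Int}, y ∈ popB n k i x st → y ∈ st := by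
  intro st
  induction st with
  | nil => simp [popB]
  | cons t rest ih =>
      simp only [popB]
      split_ifs with h
      · intro hy; exact List.mem_cons_of_mem _ (ih hy)
      · exact id

theorem popB_flush {n k i x : Int} : ∀ {st : List Int}, (∀ y ∈ st, y < x) → k ≤ n - i →
    popB n k i x st = [] := by
  intro st
  induction st with
  | nil => intro _ _; rfl
  | cons t rest ih =>
      intro hlt hk
      have hcond : t < x ∧ (((t :: rest).length : Int) + (n - i) > k) := by
        refine ⟨hlt t (by simp), ?_⟩
        have h1 : ((t :: rest).length : Int) = (rest.length : Int) + 1 := by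
          push_cast [List.length_cons]; ring
        omega
      simp only [popB, if_pos hcond]
      exact ih (fun y hy => hlt y (List.mem_cons_of_mem _ hy)) hk

theorem popB_shift {n k i n' i' x : Int} (h : n - i = n' - i') : ∀ (st : List Int),
    popB n k i x st = popB n' k i' x st := by
  intro st
  induction st with
  | nil => rfl
  | cons t rest ih =>
      simp only [popB, h, ih]

theorem popB_append_m {n k i x m : Int} (hm : m < x → n - i < k) : ∀ (st : List Int),
    popB n k i x (st ++ [m]) = popB n (k - 1) i x st ++ [m] := by
  intro st
  induction st with
  | nil =>
      simp only [List.nil_append, popB]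
      have : ¬ (m < x ∧ ((([m] : List Int).length : Int) + (n - i) > k)) := by
        rintro ⟨h1, h2⟩
        have := hm h1
        simp [List.length_cons] at h2
        omega
      rw [if_neg this]
  | cons t rest ih =>
      simp only [List.cons_append, popB]
      have hlen : (((t :: (rest ++ [m])).length : Int) + (n - i) > k)
          ↔ (((t :: rest).length : Int) + (n - i) > k - 1) := by
        simp [List.length_cons, List.length_append]
        omega
      by_cases hc : t < x ∧ (((t :: rest).length : Int) + (n - i) > k - 1)
      · rw [if_pos ⟨hc.1, hlen.mpr hc.2⟩, if_pos hc, ih]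
      · have : ¬ (t < x ∧ (((t :: (rest ++ [m])).length : Int) + (n - i) > k)) := by
          rintro ⟨h1, h2⟩; exact hc ⟨h1, hlen.mp h2⟩
        rw [if_neg this, if_neg hc]
        simp

theorem popB_len {n k i x : Int} : ∀ {st : List Int},
    (st.length : Int) + (n - i) ≥ k → ((popB n k i x st).length : Int) + (n - i) ≥ k := by
  intro st
  induction st with
  | nil => intro h; exact h
  | cons t rest ih =>
      intro h
      simp only [popB]
      split_ifs with hc
      · refine ih ?_
        have := hc.2
        simp [List.length_cons] at this ⊢
        omega
      · exact h

theorem runA_shift {n k n' : Int} : ∀ (bs : List Int) (i i' : Int) (st : List Int),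
    n - i = n' - i' → runA n k bs i st = runA n' k bs i' st := by
  intro bs
  induction bs with
  | nil => intro i i' st _; rfl
  | cons x xs ih =>
      intro i i' st h
      simp only [runA]
      rw [popB_shift h, ih (i+1) (i'+1) _ (by omega)]

theorem runA_prefix {n k m : Int} (suf : List Int) : ∀ (pre : List Int) (i : Int) (st : List Int),
    (∀ y ∈ pre, y < m) → (∀ y ∈ st, y < m) → k ≤ n - (i + pre.length) →
    runA n k (pre ++ m :: suf) i st = runA n k suf (i + pre.length + 1) [m] := by
  intro pre
  induction pre with
  | nil =>
      intro i st _ hst hk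
      simp only [List.nil_append, runA, List.length_nil]
      rw [popB_flush hst (by omega)]
      norm_num
  | cons x pre ih =>
      intro i st hpre hst hk
      simp only [List.cons_append, runA]
      rw [ih (i+1) _ (fun y hy => hpre y (List.mem_cons_of_mem _ hy))
        (by
          intro y hy
          rcases List.mem_cons.mp hy with h | h
          · exact h ▸ hpre _ (by simp)
          · exact hst y (mem_popB h))
        (by push_cast [List.length_cons] at hk; omega)]
      congr 1
      push_cast [List.length_cons]
      ring

theorem runA_append_m {n k m : Int} : ∀ (suf : List Int) (i : Int) (st : List Int),
    (i + (suf.length : Int) = n) →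
    (∀ l x xs, suf = l ++ x :: xs → m < x → (xs.length : Int) + 2 ≤ k) →
    runA n k suf i (st ++ [m]) = (runA n (k - 1) suf i st) ++ [m] := by
  intro suf
  induction suf with
  | nil => intro i st _ _; rfl
  | cons x xs ih =>
      intro i st hn hsuf
      simp only [runA]
      have hm : m < x → n - i < k := by
        intro hmx
        have := hsuf [] x xs (by simp) hmx
        push_cast [List.length_cons] at hn
        omega
      rw [popB_append_m hm, show x :: (popB n (k-1) i x st ++ [m]) = (x :: popB n (k-1) i x st) ++ [m] from rfl]
      rw [ih (i+1) _ (by push_cast [List.length_cons] at hn ⊢; omega)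
        (fun l y ys hsp hmy => hsuf (x :: l) y ys (by rw [hsp]; rfl) hmy)]

theorem runA_len {n k : Int} : ∀ (bs : List Int) (i : Int) (st : List Int),
    (i + (bs.length : Int) = n) → ((st.length : Int) + (n - i) ≥ k) →
    ((runA n k bs i st).length : Int) ≥ k := by
  intro bs
  induction bs with
  | nil =>
      intro i st hn hk
      simp only [runA]
      push_cast [List.length_nil] at hn
      omega
  | cons x xs ih =>
      intro i st hn hk
      simp only [runA]
      refine ih (i+1) _ (by push_cast [List.length_cons] at hn ⊢; omega) ?_
      have := popB_len (n := n) (k := k) (i := i) (x := x) (st := st) hk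
      simp only [List.length_cons]
      push_cast at this ⊢
      omega

theorem horner_init : ∀ (T : List Int) (a : Int),
    T.foldl (fun v x => v * 10 + x) a = a * 10 ^ T.length + T.foldl (fun v x => v * 10 + x) 0 := by
  intro T
  induction T with
  | nil => intro a; simp
  | cons x T ih =>
      intro a
      simp only [List.foldl_cons, List.length_cons]
      rw [ih (a * 10 + x), ih (0 * 10 + x)]
      ring

-- decomposition of the final stack: bottom element is the greedy max, the rest is the
-- stack of the (k-1)-run on the suffix after its first occurrence
theorem stack_decomp (bs : List Int) (k : Int) (m : Int) (i0 : Nat)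
    (hk1 : 1 ≤ k) (hkn : k ≤ (bs.length : Int))
    (hmax : PySem.List.max? (bs.take (bs.length - (k - 1).toNat)) (fun y => y) = some m)
    (hidx : PySem.List.index? bs m = some i0) :
    runA (bs.length) k bs 0 []
      = runA (bs.length) (k - 1) (bs.drop (i0 + 1)) ((i0 : Int) + 1) [] ++ [m] := by
  obtain ⟨hi0, hbs, hmin⟩ := PySem.List.getElem_of_index?_eq_some hidx
  have hknat : (((k - 1).toNat : Nat) : Int) = k - 1 := Int.toNat_of_nonneg (by omega)
  have hle : ∀ y ∈ bs.take (bs.length - (k - 1).toNat), y ≤ m := PySem.List.max?_isMax hmax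
  have hmemtake : ∀ (j : Nat) (hj : j < bs.length), j < bs.length - (k - 1).toNat →
      bs[j] ∈ bs.take (bs.length - (k - 1).toNat) := by
    intro j hj hjt
    have hjl : j < (bs.take (bs.length - (k - 1).toNat)).length := by
      simp [List.length_take]; omega
    have h1 : (bs.take (bs.length - (k - 1).toNat))[j]'hjl = bs[j]'hj := List.getElem_take
    exact h1 ▸ List.getElem_mem hjl
  -- the first occurrence of m lies inside the window
  have hi0t : i0 < bs.length - (k - 1).toNat := by
    obtain ⟨j, hj, hjm⟩ := List.getElem_of_mem (PySem.List.max?_mem hmax)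
    have hjt : j < bs.length - (k - 1).toNat := lt_of_lt_of_le hj (by simp [List.length_take])
    have hjn : j < bs.length := by omega
    have hjm' : bs[j]'hjn = m := by
      have h1 : (bs.take (bs.length - (k - 1).toNat))[j]'hj = bs[j]'hjn := List.getElem_take
      rw [← h1]; exact hjm
    by_contra hcon
    exact hmin j (by omega) hjm'
  have hpre : ∀ y ∈ bs.take i0, y < m := by
    intro y hy
    obtain ⟨j, hj, hjy⟩ := List.getElem_of_mem hy
    have hji0 : j < i0 := lt_of_lt_of_le hj (by simp [List.length_take])
    have hjn : j < bs.length := by omega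
    have hyv : bs[j]'hjn = y := by
      have h1 : (bs.take i0)[j]'hj = bs[j]'hjn := List.getElem_take
      rw [← h1]; exact hjy
    have hylt : y ≤ m := hle y (hyv ▸ hmemtake j hjn (by omega))
    have : y ≠ m := hyv ▸ hmin j hji0
    omega
  have hdecomp : bs = bs.take i0 ++ m :: bs.drop (i0 + 1) := by
    conv_lhs => rw [← List.take_append_drop i0 bs]
    rw [List.drop_eq_getElem_cons hi0, hbs]
  calc runA (bs.length) k bs 0 []
      = runA (bs.length) k (bs.take i0 ++ m :: bs.drop (i0 + 1)) 0 [] := by rw [← hdecomp]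
    _ = runA (bs.length) k (bs.drop (i0 + 1)) (0 + ((bs.take i0).length : Int) + 1) [m] := by
        exact runA_prefix _ _ 0 [] hpre (by simp) (by
          rw [List.length_take_of_le (by omega)]
          omega)
    _ = runA (bs.length) k (bs.drop (i0 + 1)) ((i0 : Int) + 1) [m] := by
        rw [List.length_take_of_le (by omega)]
        norm_num
    _ = runA (bs.length) (k - 1) (bs.drop (i0 + 1)) ((i0 : Int) + 1) [] ++ [m] := by
        have := runA_append_m (n := (bs.length : Int)) (k := k) (m := m)
          (bs.drop (i0 + 1)) ((i0 : Int) + 1) []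
          (by push_cast [List.length_drop]; omega)
          (by
            intro l x xs hsp hmx
            -- x sits at global index i0+1+l.length, past the window since m < x
            have hlen : (bs.drop (i0 + 1)).length = l.length + 1 + xs.length := by
              rw [hsp]; simp [List.length_append]; omega
            have hlend : (bs.drop (i0 + 1)).length = bs.length - (i0 + 1) := List.length_drop
            have hjn : i0 + 1 + l.length < bs.length := by omega
            have hx : bs[i0 + 1 + l.length]'hjn = x := by
              have h1 : (bs.drop (i0 + 1))[l.length]'(by omega) = bs[i0 + 1 + l.length]'hjn := by
                rw [List.getElem_drop]
              have h2 : (bs.drop (i0 + 1))[l.length]'(by omega) = x := by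
                simp only [hsp]
                rw [List.getElem_append_right (le_refl l.length)]
                simp
              rw [← h1, h2]
            by_contra hcon
            have hjt : i0 + 1 + l.length < bs.length - (k - 1).toNat := by omega
            have : x ≤ m := hle x (hx ▸ hmemtake _ hjn hjt)
            omega)
        exact this
  

theorem main_equiv : ∀ (K : Nat) (bs : List Int), 1 ≤ (K : Int) → (K : Int) ≤ (bs.length : Int) →
    optimize_joltage bs (K : Int) = optimize_joltage_alt bs (K : Int) := by
  intro K
  induction K with
  | zero => intro bs h1 _; norm_num at h1
  | succ K ih =>
    intro bs h1 h2
    have hklen : K + 1 ≤ bs.length := by exact_mod_cast h2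
    have hkm1 : ((((K + 1 : Nat)) : Int) - 1) = (K : Int) := by push_cast; ring
    have hkt : ((((K + 1 : Nat) : Int)) - 1).toNat = K := by rw [hkm1]; exact Int.toNat_natCast K
    -- the window is nonempty, so Python's max returns its first maximum m
    obtain ⟨m, hm⟩ : ∃ m, PySem.List.max? (bs.take (bs.length - K)) (fun y => y) = some m := by
      cases hmm : PySem.List.max? (bs.take (bs.length - K)) (fun y => y) with
      | none =>
          exfalso
          have := (PySem.List.max?_eq_none_iff _ _).mp hmm
          have hlt : (bs.take (bs.length - K)).length = bs.length - K := List.length_take_of_le (by omega)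
          rw [this] at hlt
          simp at hlt
          omega
      | some m => exact ⟨m, rfl⟩
    have hmb : m ∈ bs := List.mem_of_mem_take (PySem.List.max?_mem hm)
    obtain ⟨i0, hidx⟩ : ∃ i0, PySem.List.index? bs m = some i0 :=
      Option.isSome_iff_exists.mp (((PySem.List.index?_isSome_iff bs m).mpr hmb))
    obtain ⟨hi0, hbsi0, hmin⟩ := PySem.List.getElem_of_index?_eq_some hidx
    -- the first occurrence of m lies inside the window
    have hi0t : i0 < bs.length - K := by
      obtain ⟨j, hj, hjm⟩ := List.getElem_of_mem (PySem.List.max?_mem hm)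
      have hjt : j < bs.length - K := lt_of_lt_of_le hj (by simp [List.length_take])
      have hjn : j < bs.length := by omega
      have hjm' : bs[j]'hjn = m := by
        have hh : (bs.take (bs.length - K))[j]'hj = bs[j]'hjn := List.getElem_take
        rw [← hh]; exact hjm
      by_contra hcon
      exact hmin j (by omega) hjm'
    -- the final stack of B, decomposed
    have hstack := stack_decomp bs (((K + 1 : Nat)) : Int) m i0 (by push_cast; omega)
      (by push_cast; omega) (by rw [hkt]; exact hm) hidx
    have hlen_stack : ((runA (bs.length) (((K + 1 : Nat)) : Int) bs 0 []).length : Int)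
        ≥ (((K + 1 : Nat)) : Int) := by
      refine runA_len bs 0 [] (by simp) ?_
      simp only [List.length_nil]
      push_cast
      omega
    have hinner_len : K ≤ (runA (bs.length) ((((K + 1 : Nat)) : Int) - 1) (bs.drop (i0 + 1)) ((i0 : Int) + 1) []).length := by
      rw [hstack, List.length_append] at hlen_stack
      simp only [List.length_cons, List.length_nil] at hlen_stack
      omega
    -- evaluate B on bs
    have hB : optimize_joltage_alt bs (((K + 1 : Nat)) : Int)
        = 10 ^ K * m + (List.take K (runA (bs.length) ((((K + 1 : Nat)) : Int) - 1) (bs.drop (i0 + 1)) ((i0 : Int) + 1) []).reverse).foldl (fun v x => v * 10 + x) 0 := by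
      simp only [optimize_joltage_alt]
      rw [if_neg (by push_cast; omega)]
      rw [foldl_enum_eq_runA, hstack, List.reverse_append]
      simp only [List.reverse_cons, List.reverse_nil, List.nil_append, List.singleton_append]
      rw [PySem.List.slice_to _ (by positivity)]
      rw [show ((((K + 1 : Nat)) : Int)).toNat = K + 1 from Int.toNat_natCast (K + 1)]
      rw [List.take_succ_cons, List.foldl_cons, horner_init]
      have hlt : (List.take K (runA (bs.length) ((((K + 1 : Nat)) : Int) - 1) (bs.drop (i0 + 1)) ((i0 : Int) + 1) []).reverse).length = K :=
        List.length_take_of_le (by rw [List.length_reverse]; omega)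
      rw [hlt]
      ring
    by_cases hK0 : K = 0
    · -- num_digits = 1 : A returns max(batteries) directly
      subst hK0
      have hA : optimize_joltage bs ((((0 + 1 : Nat)) : Int)) = (PySem.List.max? bs (fun y => y)).getD 0 := by
        rw [optimize_joltage.eq_def]
        norm_num
      rw [hA, hB]
      have : bs.take (bs.length - 0) = bs := by simp
      rw [this] at hm
      rw [hm]
      simp
    · -- num_digits ≥ 2 : A recurses; apply the induction hypothesis to the suffix
      have hKpos : 1 ≤ K := by omega
      rw [optimize_joltage.eq_def]
      rw [if_neg (by push_cast; omega)]
      rw [show (-((((K + 1 : Nat)) : Int) - 1)) = -((K : Nat) : Int) by push_cast; ring]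
      rw [PySem.List.slice_to_neg_natCast bs K (by omega)]
      rw [hm]
      simp only []
      split
      · next heq => rw [hidx] at heq; cases heq
      · next idx heq =>
        rw [hidx] at heq
        injection heq with heq'
        subst heq'
        rw [show ((i0 : Int) + 1) = (((i0 + 1 : Nat)) : Int) by push_cast; ring]
        rw [PySem.List.slice_from_natCast]
        rw [hkt, hkm1]
        have hsuf_len : (K : Int) ≤ ((bs.drop (i0 + 1)).length : Int) := by
          rw [List.length_drop]; omega
        rw [ih (bs.drop (i0 + 1)) (by exact_mod_cast hKpos) hsuf_len]
        -- evaluate B on the suffix and match it with the tail of hB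
        have hBsuf : optimize_joltage_alt (bs.drop (i0 + 1)) ((K : Nat) : Int)
            = (List.take K (runA (bs.length) ((K : Nat) : Int) (bs.drop (i0 + 1)) ((i0 : Int) + 1) []).reverse).foldl (fun v x => v * 10 + x) 0 := by
          simp only [optimize_joltage_alt]
          rw [if_neg (by omega)]
          rw [foldl_enum_eq_runA]
          rw [runA_shift (n := (((bs.drop (i0 + 1)).length : Nat) : Int)) (n' := ((bs.length : Nat) : Int)) (k := ((K : Nat) : Int)) (bs.drop (i0 + 1)) 0 ((i0 : Int) + 1) []
            (by rw [List.length_drop]; omega)]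
          rw [PySem.List.slice_to_natCast]
        rw [hkm1] at hB
        rw [hBsuf, hB]

-- ===== VERDICT (by name: the statement is the Claim_ definition above) =====
theorem optimize_joltage_spec : Claim_equal_optimize_joltage := by
  intro bs k _ hpre
  obtain ⟨h1, h2⟩ := hpre
  have hk : k = ((k.toNat : Nat) : Int) := by omega
  unfold Spec_optimize_joltage
  rw [hk]
  exact main_equiv k.toNat bs (by omega) (by omega)
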